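-- pv_equiv track=rewrite | github.com/MertAli07/neural-network-CNN | main.py | earlystop
-- ===== SOURCE A (Python) =====
-- def earlystop(ar):
--     first5 = ar[:5]
--     last5 = ar[-5:]
--     res = []
--     for i in last5:
--         flag = all(i > j for j in first5)
--         res.append(flag)
--     if(False in res):
--         return False
--     else:
--         return True
-- ===== SOURCE B (Python) =====
-- def earlystop(ar):
--     # Aggregate comparison instead of a nested scan: all of last5 exceed all of
--     # first5 iff min(last5) > max(first5); empty input is vacuously True.
--     if not ar:
--         return True
--     return min(ar[-5:]) > max(ar[:5])
-- ===== Notes on version B (the rewrite author's own statement) =====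
-- stated objective: simpler
-- what changed: Replaces the nested all-pairs scan with a res list and membership test by the single comparison min(last5) > max(first5), with an explicit vacuous-truth case for the empty list.
import Mathlib
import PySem

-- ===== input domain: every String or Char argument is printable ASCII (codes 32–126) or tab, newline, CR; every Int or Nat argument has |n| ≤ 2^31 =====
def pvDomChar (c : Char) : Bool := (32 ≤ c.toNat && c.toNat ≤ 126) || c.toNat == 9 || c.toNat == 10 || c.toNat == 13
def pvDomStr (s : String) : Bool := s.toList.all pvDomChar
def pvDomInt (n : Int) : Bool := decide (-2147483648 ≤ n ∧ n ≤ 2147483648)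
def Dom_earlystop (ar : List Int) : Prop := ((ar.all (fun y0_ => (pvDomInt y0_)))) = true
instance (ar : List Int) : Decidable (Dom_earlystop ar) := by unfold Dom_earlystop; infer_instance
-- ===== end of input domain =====

-- B replaces A's nested all-pairs scan with the single comparison min(last5) > max(first5) (simpler).

-- ===== PORT A =====
def earlystop (ar : List Int) : Bool :=
  let first5 := PySem.List.slice ar none (some 5)
  let last5 := PySem.List.slice ar (some (-5)) none
  let res := last5.foldl (fun res i => res ++ [first5.all (fun j => decide (i > j))]) []
  if res.contains false then false else true

-- ===== PORT B =====
def earlystop_alt (ar : List Int) : Bool :=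
  if ar = [] then true
  else
    match PySem.List.min? (PySem.List.slice ar (some (-5)) none) (fun x => x),
          PySem.List.max? (PySem.List.slice ar none (some 5)) (fun x => x) with
    | some m, some M => decide (m > M)
    | _, _ => true   -- unreachable: both slices of a nonempty list are nonempty

-- ===== PRECONDITION & SPEC =====
def Spec_earlystop (ar : List Int) (out : Bool) : Prop := out = earlystop_alt ar
instance (ar : List Int) (out : Bool) : Decidable (Spec_earlystop ar out) := by unfold Spec_earlystop; infer_instance

-- ===== CLAIM (what is proved, stated in full; the proofs are below) =====
def Claim_equal_earlystop : Prop := ∀ (ar : List Int), Dom_earlystop ar → Spec_earlystop ar (earlystop ar)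

-- ===== LEMMAS AND PROOFS =====

theorem pv_foldl_append (l : List Int) (f : Int → Bool) (acc : List Bool) :
    l.foldl (fun res i => res ++ [f i]) acc = acc ++ l.map f := by
  induction l generalizing acc with
  | nil => simp
  | cons x t ih => simp [List.foldl, ih]

theorem pv_contains_map (l : List Int) (f : Int → Bool) :
    ((l.map f).contains false) = !(l.all f) := by
  induction l with
  | nil => rfl
  | cons x t ih =>
    simp only [List.map_cons, List.contains_cons, List.all_cons, ih]
    cases f x <;> simp

theorem pv_A_eq_all (ar : List Int) :
    earlystop ar
      = ((PySem.List.slice ar (some (-5)) none).all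
          (fun i => (PySem.List.slice ar none (some 5)).all (fun j => decide (i > j)))) := by
  unfold earlystop
  simp only [pv_foldl_append, List.nil_append, pv_contains_map]
  cases ((PySem.List.slice ar (some (-5)) none).all
      (fun i => (PySem.List.slice ar none (some 5)).all (fun j => decide (i > j)))) <;> simp

theorem earlystop_spec_aux (ar : List Int) : earlystop ar = earlystop_alt ar := by
  rw [pv_A_eq_all]
  unfold earlystop_alt
  by_cases hnil : ar = []
  · subst hnil; decide
  · simp only [if_neg hnil]
    have hlen : 0 < ar.length := List.length_pos_iff.mpr hnil
    have hlast : PySem.List.slice ar (some (-5)) none ≠ [] := by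
      rw [PySem.List.slice_from_neg_ofNat ar 5 (by omega)]
      intro h
      have := List.drop_eq_nil_iff.mp h
      omega
    have hfirst : PySem.List.slice ar none (some 5) ≠ [] := by
      rw [PySem.List.slice_to ar (by omega : (0:Int) ≤ (5:Int))]
      intro h
      rcases List.take_eq_nil_iff.mp h with h5 | h0
      · norm_num at h5
      · exact hnil h0
    cases hm : PySem.List.min? (PySem.List.slice ar (some (-5)) none) (fun x => x) with
    | none => exact absurd ((PySem.List.min?_eq_none_iff _ _).mp hm) hlast
    | some m =>
      cases hM : PySem.List.max? (PySem.List.slice ar none (some 5)) (fun x => x) with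
      | none => exact absurd ((PySem.List.max?_eq_none_iff _ _).mp hM) hfirst
      | some M =>
        have hmmem := PySem.List.min?_mem hm
        have hMmem := PySem.List.max?_mem hM
        have hmmin := PySem.List.min?_isMin hm
        have hMmax := PySem.List.max?_isMax hM
        show _ = decide (m > M)
        rcases hd : decide (m > M) with _ | _
        · simp only [decide_eq_false_iff_not, not_lt] at hd
          refine List.all_eq_false.mpr ⟨m, hmmem, ?_⟩
          simp only [Bool.not_eq_true]
          refine List.all_eq_false.mpr ⟨M, hMmem, ?_⟩
          simp only [Bool.not_eq_true, decide_eq_false_iff_not, not_lt]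
          omega
        · simp only [decide_eq_true_eq] at hd
          refine List.all_eq_true.mpr (fun i hi => List.all_eq_true.mpr (fun j hj => ?_))
          have h1 := hmmin i hi
          have h2 := hMmax j hj
          simp only [decide_eq_true_eq]
          omega

-- ===== VERDICT (by name: the statement is the Claim_ definition above) =====
theorem earlystop_spec : Claim_equal_earlystop := by
  intro ar _
  exact earlystop_spec_aux ar
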